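-- pv_equiv track=rewrite | github.com/LMP-dev/AdventOfCode | 2023/day_09/puzzleB.py | find_extrapolation_data
-- ===== SOURCE A (Python) =====
-- def find_extrapolation_data(history_val: list[int], first_val: list) -> list[int]:
--     """Last values of each row is stored in list last_val"""
--     diff_values = [y - x for x, y in zip(history_val[:-1], history_val[1:])]
--     first_val.append(history_val[0])
--
--     all_same_value = diff_values.count(diff_values[0]) == len(diff_values)
--     if all_same_value and diff_values[0] == 0:
--         first_val.append(0)
--         return first_val
--     else:
--         return find_extrapolation_data(diff_values, first_val)
-- ===== SOURCE B (Python) =====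
-- def find_extrapolation_data(history_val: list[int], first_val: list) -> list[int]:
--     """Iterative version: walk the difference pyramid row by row, collecting the
--     first element of each row, then extend first_val once and close with 0.
--     (Equivalence is about the return value; on raising inputs mutation differs.)"""
--     row = history_val
--     firsts = []
--     while True:
--         firsts.append(row[0])
--         row = [b - a for a, b in zip(row, row[1:])]
--         if row and all(v == 0 for v in row):
--             break
--     first_val.extend(firsts)
--     first_val.append(0)
--     return first_val
-- ===== Notes on version B (the rewrite author's own statement) =====
-- stated objective: alternative
-- what changed: A's tail recursion threading the accumulator through each call is replaced by an explicit while-loop that collects the first element of every difference row into a local list and extends first_val once at the end; the stop test uses all(v == 0) instead of count()==len plus a zero check.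
import Mathlib
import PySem

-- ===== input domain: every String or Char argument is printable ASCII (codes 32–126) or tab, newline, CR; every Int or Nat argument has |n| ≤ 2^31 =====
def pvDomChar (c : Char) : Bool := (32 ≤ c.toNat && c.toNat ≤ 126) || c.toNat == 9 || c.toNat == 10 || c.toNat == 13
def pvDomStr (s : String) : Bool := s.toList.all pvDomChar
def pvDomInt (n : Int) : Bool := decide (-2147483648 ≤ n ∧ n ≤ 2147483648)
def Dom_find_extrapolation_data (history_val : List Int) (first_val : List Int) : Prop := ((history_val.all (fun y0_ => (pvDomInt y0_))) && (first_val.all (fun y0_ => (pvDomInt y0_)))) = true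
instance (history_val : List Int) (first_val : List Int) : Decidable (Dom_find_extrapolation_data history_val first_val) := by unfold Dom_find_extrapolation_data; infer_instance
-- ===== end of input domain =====

-- B replaces A's tail recursion by an explicit loop that collects the first element of each
-- difference row and appends them to first_val at once (alternative decomposition, same cost);
-- the equivalence proved is about the RETURN value (A mutates first_val in place as it recurses).


-- ===== PORT A =====
-- length of the diff row [y - x for x, y in zip(l[:-1], l[1:])]; cited by the termination proof
theorem pvDiffA_length (l : List Int) :
    ((List.zip (PySem.List.slice l none (some (-1))) (PySem.List.slice l (some 1) none)).map
      (fun p => p.2 - p.1)).length = l.length - 1 := by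
  simp [PySem.List.slice_to_neg_one, PySem.List.slice_from_one]

def find_extrapolation_data : List Int → List Int → List Int
  | [], first_val => first_val      -- Python raises IndexError here (history_val[0]); junk value
  | h0 :: rest, first_val =>
    -- diff_values = [y - x for x, y in zip(history_val[:-1], history_val[1:])]
    let diff_values := (List.zip (PySem.List.slice (h0 :: rest) none (some (-1)))
        (PySem.List.slice (h0 :: rest) (some 1) none)).map (fun p => p.2 - p.1)
    let first_val := first_val ++ [h0]          -- first_val.append(history_val[0])
    match diff_values with
    | [] => first_val                -- Python raises IndexError here (diff_values[0]); junk value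
    | d0 :: _ =>
      if PySem.List.count diff_values d0 = diff_values.length ∧ d0 = 0 then
        first_val ++ [0]
      else
        find_extrapolation_data diff_values first_val
termination_by l _ => l.length
decreasing_by
  have := pvDiffA_length (h0 :: rest)
  simp only [this]
  simp

-- ===== PORT B =====
-- the while-True loop of Source B: firsts accumulates row[0] of each row
def pvAltLoop : List Int → List Int → List Int
  | [], firsts => firsts            -- Python raises IndexError here (row[0]); junk value
  | r0 :: rest, firsts =>
    let firsts := firsts ++ [r0]
    let row := List.zipWith (fun a b => b - a) (r0 :: rest) rest
    if row ≠ [] ∧ row.all (· == 0) then firsts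
    else pvAltLoop row firsts
termination_by r _ => r.length
decreasing_by
  simp [List.length_zipWith]

def find_extrapolation_data_alt (history_val : List Int) (first_val : List Int) : List Int :=
  (first_val ++ pvAltLoop history_val []) ++ [0]

-- ===== PRECONDITION & SPEC =====
-- Pre_ holds exactly when the Python A returns: at least two values and the (n-1)-st finite
-- difference of the row vanishes (closed form: the alternating binomial sum is zero); on all
-- other inputs A (and B) raise IndexError when the difference pyramid runs out.
def Pre_find_extrapolation_data (history_val : List Int) (first_val : List Int) : Prop :=
  2 ≤ history_val.length ∧
    ∑ i ∈ Finset.range history_val.length,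
      (-1 : ℤ) ^ i * ((history_val.length - 1).choose i) * history_val.getD i 0 = 0

instance (history_val : List Int) (first_val : List Int) : Decidable (Pre_find_extrapolation_data history_val first_val) := by unfold Pre_find_extrapolation_data; infer_instance

def pvWitness_find_extrapolation_data : List Int × List Int := ([1, 2, 3], [])

def Spec_find_extrapolation_data (history_val : List Int) (first_val : List Int) (out : List Int) : Prop := out = find_extrapolation_data_alt history_val first_val
instance (history_val : List Int) (first_val : List Int) (out : List Int) : Decidable (Spec_find_extrapolation_data history_val first_val out) := by unfold Spec_find_extrapolation_data; infer_instance

-- ===== CLAIM (what is proved, stated in full; the proofs are below) =====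
def Claim_equal_find_extrapolation_data : Prop := ∀ (history_val : List Int) (first_val : List Int), Dom_find_extrapolation_data history_val first_val → Pre_find_extrapolation_data history_val first_val → Spec_find_extrapolation_data history_val first_val (find_extrapolation_data history_val first_val)

-- ===== LEMMAS AND PROOFS =====

-- one difference row, and its iteration (proof-only helpers)
def pvDiff (l : List Int) : List Int := List.zipWith (fun a b => b - a) l l.tail

def pvItd : Nat → List Int → List Int
  | 0, l => l
  | k + 1, l => pvItd k (pvDiff l)

theorem pvDiff_length (l : List Int) : (pvDiff l).length = l.length - 1 := by
  simp [pvDiff]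

theorem pvMapZip (l1 l2 : List Int) :
    (l1.zip l2).map (fun p => p.2 - p.1) = List.zipWith (fun a b => b - a) l1 l2 := by
  induction l1 generalizing l2 with
  | nil => simp
  | cons a t ih => cases l2 <;> simp [ih]

theorem pvZipWith_dropLast_tail (f : Int → Int → Int) :
    ∀ l : List Int, List.zipWith f l.dropLast l.tail = List.zipWith f l l.tail
  | [] => rfl
  | [_] => rfl
  | a :: b :: t => by
    have ih := pvZipWith_dropLast_tail f (b :: t)
    simp only [List.tail_cons] at ih ⊢
    simp [List.dropLast_cons₂, ih]

theorem pvDiffA_eq (l : List Int) :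
    ((List.zip (PySem.List.slice l none (some (-1))) (PySem.List.slice l (some 1) none)).map
      (fun p => p.2 - p.1)) = pvDiff l := by
  rw [PySem.List.slice_to_neg_one, PySem.List.slice_from_one, pvMapZip]
  exact pvZipWith_dropLast_tail _ l

theorem pvDiff_getD (l : List Int) (i : Nat) (hi : i + 1 < l.length) :
    (pvDiff l).getD i 0 = l.getD (i + 1) 0 - l.getD i 0 := by
  have h1 : i < (pvDiff l).length := by rw [pvDiff_length]; omega
  have h2 : i < l.tail.length := by simp; omega
  rw [List.getD_eq_getElem _ _ h1, List.getD_eq_getElem _ _ (by omega : i + 1 < l.length),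
    List.getD_eq_getElem _ _ (by omega : i < l.length)]
  simp [pvDiff, List.getElem_tail]

theorem pvItd_length : ∀ (k : Nat) (l : List Int), (pvItd k l).length = l.length - k
  | 0, l => by simp [pvItd]
  | k + 1, l => by
    rw [pvItd, pvItd_length k, pvDiff_length]
    omega

theorem pvItd_headD : ∀ (k : Nat) (l : List Int), k < l.length →
    (-1 : ℤ) ^ k * (pvItd k l).headD 0 =
      ∑ i ∈ Finset.range (k + 1), (-1 : ℤ) ^ i * (k.choose i) * l.getD i 0
  | 0, l, _ => by cases l <;> simp [pvItd]
  | k + 1, l, hl => by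
    have hdl : (pvDiff l).length = l.length - 1 := pvDiff_length l
    have ih := pvItd_headD k (pvDiff l) (by omega)
    have step1 : (-1 : ℤ) ^ (k + 1) * (pvItd (k + 1) l).headD 0 =
        (-1) * ∑ i ∈ Finset.range (k + 1), (-1 : ℤ) ^ i * (k.choose i) * (pvDiff l).getD i 0 := by
      rw [pvItd, ← ih]; ring
    have step2 : ∀ i ∈ Finset.range (k + 1),
        (-1 : ℤ) ^ i * (k.choose i) * (pvDiff l).getD i 0 =
          (-1 : ℤ) ^ i * (k.choose i) * (l.getD (i + 1) 0 - l.getD i 0) := by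
      intro i hi
      rw [pvDiff_getD l i (by simp at hi; omega)]
    rw [step1, Finset.sum_congr rfl step2]
    -- split the difference and recombine with Pascal's rule
    have expand : (-1 : ℤ) * ∑ i ∈ Finset.range (k + 1),
        (-1 : ℤ) ^ i * (k.choose i) * (l.getD (i + 1) 0 - l.getD i 0) =
        (∑ i ∈ Finset.range (k + 1), (-1 : ℤ) ^ (i + 1) * (k.choose i) * l.getD (i + 1) 0) +
        ∑ i ∈ Finset.range (k + 1), (-1 : ℤ) ^ i * (k.choose i) * l.getD i 0 := by
      rw [Finset.mul_sum, ← Finset.sum_add_distrib]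
      exact Finset.sum_congr rfl (fun i _ => by ring)
    rw [expand]
    -- name the pieces
    set S2 : ℤ := ∑ i ∈ Finset.range (k + 1), (-1 : ℤ) ^ i * (k.choose i) * l.getD i 0 with hS2
    have hT : (∑ i ∈ Finset.range (k + 1), (-1 : ℤ) ^ (i + 1) * (k.choose (i + 1)) * l.getD (i + 1) 0)
        = S2 - l.getD 0 0 := by
      have h' := Finset.sum_range_succ' (fun j => (-1 : ℤ) ^ j * (k.choose j) * l.getD j 0) (k + 1)
      have hz : ((-1 : ℤ) ^ (k + 1) * (k.choose (k + 1)) * l.getD (k + 1) 0) = 0 := by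
        rw [Nat.choose_succ_self]; simp
      rw [Finset.sum_range_succ, hz, add_zero] at h'
      simp only [Nat.choose_zero_right, pow_zero, Nat.cast_one] at h'
      rw [← hS2] at h'
      linarith [h']
    rw [Finset.sum_range_succ' (fun i => (-1 : ℤ) ^ i * ((k + 1).choose i) * l.getD i 0) (k + 1)]
    simp only [Nat.choose_zero_right, pow_zero, Nat.cast_one, one_mul]
    have pascal : ∀ i ∈ Finset.range (k + 1),
        (-1 : ℤ) ^ (i + 1) * ((k + 1).choose (i + 1)) * l.getD (i + 1) 0 =
          (-1 : ℤ) ^ (i + 1) * (k.choose i) * l.getD (i + 1) 0 +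
          (-1 : ℤ) ^ (i + 1) * (k.choose (i + 1)) * l.getD (i + 1) 0 := by
      intro i _
      rw [Nat.choose_succ_succ]
      push_cast
      ring
    rw [Finset.sum_congr rfl pascal, Finset.sum_add_distrib, hT]
    ring

-- the loop accumulator can be pulled out front
theorem pvAltLoop_acc : ∀ (n : Nat) (r acc : List Int), r.length ≤ n →
    pvAltLoop r acc = acc ++ pvAltLoop r []
  | 0, r, acc, h => by
    have : r = [] := by cases r <;> simp_all
    subst this; simp [pvAltLoop]
  | n + 1, r, acc, h => by
    match r with
    | [] => simp [pvAltLoop]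
    | r0 :: rest =>
      rw [pvAltLoop, pvAltLoop]
      by_cases hc : List.zipWith (fun a b => b - a) (r0 :: rest) rest ≠ [] ∧
          (List.zipWith (fun a b => b - a) (r0 :: rest) rest).all (· == 0)
      · simp [hc]
      · simp only [if_neg hc]
        have hlen : (List.zipWith (fun a b => b - a) (r0 :: rest) rest).length ≤ n := by
          simp at h ⊢; omega
        rw [pvAltLoop_acc n _ (acc ++ [r0]) hlen, pvAltLoop_acc n _ ([] ++ [r0]) hlen]
        simp

-- A's stop condition, on a nonempty diff row, says: every entry is zero
theorem pvCond_eq (d0 : Int) (ds : List Int) :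
    (PySem.List.count (d0 :: ds) d0 = (d0 :: ds).length ∧ d0 = 0) ↔ (∀ y ∈ d0 :: ds, y = 0) := by
  rw [PySem.List.count_eq]
  constructor
  · rintro ⟨hc, rfl⟩
    intro y hy
    exact (List.count_eq_length.mp hc y hy).symm
  · intro hz
    have hx : d0 = 0 := hz d0 List.mem_cons_self
    subst hx
    exact ⟨List.count_eq_length.mpr (fun y hy => (hz y hy).symm), rfl⟩

-- the main invariant: under Pre's pyramid condition A computes B's value
theorem pvMain : ∀ (n : Nat) (h fv : List Int), h.length ≤ n → 2 ≤ h.length →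
    pvItd (h.length - 1) h = [0] →
    find_extrapolation_data h fv = (fv ++ pvAltLoop h []) ++ [0]
  | 0, h, _, hn, h2, _ => by omega
  | n + 1, h, fv, hn, h2, hz => by
    match h with
    | h0 :: h1 :: t =>
      have hD : ((List.zip (PySem.List.slice (h0 :: h1 :: t) none (some (-1)))
          (PySem.List.slice (h0 :: h1 :: t) (some 1) none)).map (fun p => p.2 - p.1))
          = pvDiff (h0 :: h1 :: t) := pvDiffA_eq _
      set D := pvDiff (h0 :: h1 :: t) with hDdef
      have hDlen : D.length = t.length + 1 := by
        rw [hDdef, pvDiff_length]; simp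
      obtain ⟨d0, ds, hDcons⟩ : ∃ d0 ds, D = d0 :: ds := by
        cases hD' : D with
        | nil => rw [hD'] at hDlen; simp at hDlen
        | cons a b => exact ⟨a, b, rfl⟩
      have hItdD : pvItd (D.length - 1) D = [0] := by
        have : (h0 :: h1 :: t).length - 1 = (D.length - 1) + 1 := by
          simp [hDlen]
        rw [this, pvItd] at hz
        exact hz
      rw [find_extrapolation_data]
      simp only [hD, hDcons]
      rw [pvAltLoop]
      have hrow : List.zipWith (fun a b => b - a) (h0 :: h1 :: t) (h1 :: t) = D := by
        rw [hDdef]; rfl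
      rw [hrow, hDcons]
      by_cases hall : ∀ y ∈ D, y = 0
      · -- stop case in both programs
        have hcA : PySem.List.count (d0 :: ds) d0 = (d0 :: ds).length ∧ d0 = 0 :=
          (pvCond_eq d0 ds).mpr (hDcons ▸ hall)
        have hcB : (d0 :: ds ≠ [] ∧ (d0 :: ds).all (· == 0)) := by
          refine ⟨by simp, ?_⟩
          simp only [List.all_eq_true]
          intro y hy
          simp [hall y (hDcons ▸ hy)]
        rw [if_pos hcA, if_pos hcB]
        simp
      · -- recurse / loop again
        have hcA : ¬ (PySem.List.count (d0 :: ds) d0 = (d0 :: ds).length ∧ d0 = 0) :=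
          fun hc => hall (hDcons ▸ (pvCond_eq d0 ds).mp hc)
        have hcB : ¬ (d0 :: ds ≠ [] ∧ (d0 :: ds).all (· == 0)) := by
          rintro ⟨-, hb⟩
          apply hall
          intro y hy
          have := List.all_eq_true.mp hb y (hDcons ▸ hy)
          simpa using this
        rw [if_neg hcA, if_neg hcB]
        have hD2 : 2 ≤ D.length := by
          rcases Nat.lt_or_ge D.length 2 with hlt | hge
          · exfalso
            have h1' : D.length = 1 := by omega
            rw [h1', pvItd] at hItdD
            exact hall (by rw [hItdD]; simp)
          · exact hge
        have hfuel : D.length ≤ n := by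
          simp at hn; omega
        have ihA := pvMain n D (fv ++ [h0]) hfuel hD2 hItdD
        rw [← hDcons, ihA]
        have hloop : pvAltLoop D ([] ++ [h0]) = ([] ++ [h0]) ++ pvAltLoop D [] :=
          pvAltLoop_acc n D ([] ++ [h0]) hfuel
        rw [hloop]
        simp

-- Pre gives the pyramid condition
theorem pvPre_itd (h fv : List Int) (hp : Pre_find_extrapolation_data h fv) :
    pvItd (h.length - 1) h = [0] := by
  obtain ⟨h2, hsum⟩ := hp
  have hk : h.length - 1 < h.length := by omega
  have hb := pvItd_headD (h.length - 1) h hk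
  have hlen1 : (pvItd (h.length - 1) h).length = 1 := by
    rw [pvItd_length]; omega
  obtain ⟨x, hx⟩ : ∃ x, pvItd (h.length - 1) h = [x] := by
    cases hI : pvItd (h.length - 1) h with
    | nil => rw [hI] at hlen1; simp at hlen1
    | cons a b =>
      rw [hI] at hlen1
      simp at hlen1
      exact ⟨a, by rw [hlen1]⟩
  rw [hx] at hb
  simp only [List.headD_cons] at hb
  have hrange : h.length - 1 + 1 = h.length := by omega
  rw [hrange, hsum] at hb
  have hne : ((-1 : ℤ) ^ (h.length - 1)) ≠ 0 := by
    simp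
  have : x = 0 := by
    rcases mul_eq_zero.mp hb with h' | h'
    · exact absurd h' hne
    · exact h'
  rw [hx, this]

-- ===== VERDICT (by name: the statement is the Claim_ definition above) =====
theorem find_extrapolation_data_spec : Claim_equal_find_extrapolation_data := by
  intro h fv _ hp
  unfold Spec_find_extrapolation_data find_extrapolation_data_alt
  exact pvMain h.length h fv le_rfl hp.1 (pvPre_itd h fv hp)
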